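-- pv_equiv track=rewrite | github.com/leochung97/Data-Structures-Algorithms | Algorithms.py | parenthetical_possibilities
-- ===== SOURCE A (Python) =====
-- def parenthetical_possibilities(s):
--   # If our string reaches a length of zero, we cannot find any possiblities and should just return an empty string as our base case output
--   if len(s) == 0:
--     return ['']
--
--   # We set up an array containing all of our possibilities - we will fill this array and return it with the answer
--   all_possibilities = []
--   # We deconstruct the choices and the remainder found by the find_choices helper function
--   choices, remainder = find_choices(s)
--   # Now for each choice that we have within a group of characters, we create branching trees that will look into each choice and add the possibilites of recursive calls onto it
--   for choice in choices:
--     # This is our recursive leap of faith - we assume that recursively calling parenthetical possibilities will return the rest of the possibilities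
--     remainder_possibilities = parenthetical_possibilities(remainder)
--     # For each possibility, we want to add the choice to the front of it and then append that result
--     all_possibilities += [choice + possibility for possibility in remainder_possibilities]
--
--   # Don't forget to return all the possibilities we found
--   return all_possibilities
--
-- def find_choices(str):
--   if str[0] == '(':
--     end = str.index(')')
--     choices = str[1:end]
--     remainder = str[end + 1:]
--     return (choices, remainder)
--   else:
--     # Otherwise, we will just return the first character as a "choice" and the remainder of the string
--     return (str[0], str[1:])
-- ===== SOURCE B (Python) =====
-- def parenthetical_possibilities(s):
--   # Tokenize once into a list of choice groups, then build the product
--   # right-to-left, so each suffix's possibilities are computed exactly once.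
--   tokens = []
--   rest = s
--   while rest:
--     if rest[0] == '(':
--       j = rest.index(')')
--       choices = rest[1:j]
--       if not choices:
--         return []
--       tokens.append(choices)
--       rest = rest[j + 1:]
--     else:
--       tokens.append(rest[0])
--       rest = rest[1:]
--   result = ['']
--   for choices in reversed(tokens):
--     result = [c + r for c in choices for r in result]
--   return result
-- ===== Notes on version B (the rewrite author's own statement) =====
-- stated objective: faster
-- what changed: B tokenizes the string once into a list of choice groups and folds the Cartesian product right-to-left, so each suffix's possibilities are computed exactly once, instead of A's recursion that re-expands the whole remainder once per choice at every level.
import Mathlib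
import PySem

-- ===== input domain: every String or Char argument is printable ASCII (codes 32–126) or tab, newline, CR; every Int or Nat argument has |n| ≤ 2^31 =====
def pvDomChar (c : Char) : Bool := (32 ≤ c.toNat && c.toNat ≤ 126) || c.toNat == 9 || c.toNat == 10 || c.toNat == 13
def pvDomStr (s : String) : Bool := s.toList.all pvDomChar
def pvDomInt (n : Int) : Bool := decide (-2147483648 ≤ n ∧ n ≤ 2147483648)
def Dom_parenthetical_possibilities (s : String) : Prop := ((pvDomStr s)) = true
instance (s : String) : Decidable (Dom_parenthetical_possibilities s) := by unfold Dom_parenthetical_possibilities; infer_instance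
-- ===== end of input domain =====

-- B tokenizes once and folds the product right-to-left (each suffix expanded once); A re-expands the remainder per choice.

-- ===== PORT A =====
-- core of A on List Char (slices s[1:end], s[end+1:] ported as drop/take, exact for these nonnegative indices)
def pvACore : List Char → List (List Char)
  | [] => [[]]
  | c :: cs =>
    if c = '(' then
      match PySem.List.index? (c :: cs) ')' with
      | none => []  -- Python raises ValueError here; excluded by Pre_
      | some e =>
        let choices := ((c :: cs).drop 1).take (e - 1)
        let remainder := (c :: cs).drop (e + 1)
        -- the recursive call happens once per choice, as in A
        choices.foldl (fun acc ch => acc ++ (pvACore remainder).map (fun p => ch :: p)) []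
    else
      [c].foldl (fun acc ch => acc ++ (pvACore cs).map (fun p => ch :: p)) []
termination_by l => l.length
decreasing_by all_goals (simp; try omega)

def parenthetical_possibilities (s : String) : List String :=
  (pvACore s.toList).map (fun l => String.ofList l)

-- ===== PORT B =====
-- tokenizer of Source B's while-loop; `none` covers both Source B's early `return []` on an
-- empty group and the ValueError path (the latter lies outside Pre_)
def pvTokB : List Char → Option (List (List Char))
  | [] => some []
  | c :: cs =>
    if c = '(' then
      match PySem.List.index? (c :: cs) ')' with
      | none => none  -- Python raises ValueError here; excluded by Pre_
      | some j =>
        let choices := ((c :: cs).drop 1).take (j - 1)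
        if choices = [] then none  -- Source B: return []
        else (pvTokB ((c :: cs).drop (j + 1))).map (fun ts => choices :: ts)
    else
      (pvTokB cs).map (fun ts => [c] :: ts)
termination_by l => l.length
decreasing_by all_goals (simp; try omega)

def pvBCore (l : List Char) : List (List Char) :=
  match pvTokB l with
  | none => []
  | some ts => ts.foldr (fun chs acc => chs.flatMap (fun c => acc.map (fun r => c :: r))) [[]]

def parenthetical_possibilities_alt (s : String) : List String :=
  (pvBCore s.toList).map (fun l => String.ofList l)

-- ===== PRECONDITION & SPEC =====
-- Closed-form condition (a 4-state character scan, i.e. a regular language): reading left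
-- to right, no '(' is left unclosed before the first empty group '()' is reached.  On the
-- excluded strings Python's str.index raises ValueError in BOTH A and B; A returns a value
-- on every admitted string.
-- states: 0 = outside a group, 1 = just after '(', 2 = inside a nonempty group,
--         3 = an empty group '()' was seen (both programs stop there and return [])
def pvScan (st : Nat) (c : Char) : Nat :=
  if st = 0 then (if c = '(' then 1 else 0)
  else if st = 1 then (if c = ')' then 3 else 2)
  else if st = 2 then (if c = ')' then 0 else 2)
  else 3

def Pre_parenthetical_possibilities (s : String) : Prop :=
  s.toList.foldl pvScan 0 = 0 ∨ s.toList.foldl pvScan 0 = 3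
instance (s : String) : Decidable (Pre_parenthetical_possibilities s) := by unfold Pre_parenthetical_possibilities; infer_instance
def pvWitness_parenthetical_possibilities : String := "(ab)c(de)"

def Spec_parenthetical_possibilities (s : String) (out : List String) : Prop := out = parenthetical_possibilities_alt s
instance (s : String) (out : List String) : Decidable (Spec_parenthetical_possibilities s out) := by unfold Spec_parenthetical_possibilities; infer_instance

-- ===== CLAIM (what is proved, stated in full; the proofs are below) =====
def Claim_equal_parenthetical_possibilities : Prop := ∀ (s : String), Dom_parenthetical_possibilities s → Pre_parenthetical_possibilities s → Spec_parenthetical_possibilities s (parenthetical_possibilities s)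

-- ===== LEMMAS AND PROOFS =====

lemma pvACore_cons_ne (c : Char) (cs : List Char) (h : ¬ c = '(') :
    pvACore (c :: cs) = (pvACore cs).map (fun p => c :: p) := by
  rw [pvACore.eq_def]
  simp [h]

lemma pvACore_group (cs : List Char) (j : Nat)
    (hj : PySem.List.index? ('(' :: cs) ')' = some j) :
    pvACore ('(' :: cs) =
      ((('(' :: cs).drop 1).take (j - 1)).foldl
        (fun acc ch => acc ++ (pvACore (('(' :: cs).drop (j + 1))).map (fun p => ch :: p)) [] := by
  rw [pvACore.eq_def]
  simp only [if_true, hj]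

lemma pvTokB_cons_ne (c : Char) (cs : List Char) (h : ¬ c = '(') :
    pvTokB (c :: cs) = (pvTokB cs).map (fun ts => [c] :: ts) := by
  rw [pvTokB.eq_def]
  simp [h]

lemma pvTokB_group (cs : List Char) (j : Nat)
    (hj : PySem.List.index? ('(' :: cs) ')' = some j)
    (hne : ¬ (('(' :: cs).drop 1).take (j - 1) = []) :
    pvTokB ('(' :: cs) =
      (pvTokB (('(' :: cs).drop (j + 1))).map (fun ts => ((('(' :: cs).drop 1).take (j - 1)) :: ts) := by
  rw [pvTokB.eq_def]
  simp only [if_true, hj]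
  simp at hne ⊢
  simp [hne]

lemma pvTokB_group_empty (cs : List Char) (j : Nat)
    (hj : PySem.List.index? ('(' :: cs) ')' = some j)
    (he : (('(' :: cs).drop 1).take (j - 1) = []) :
    pvTokB ('(' :: cs) = none := by
  rw [pvTokB.eq_def]
  simp only [if_true, hj]
  simp_all

lemma pvBCore_cons_ne (c : Char) (cs : List Char) (h : ¬ c = '(') :
    pvBCore (c :: cs) = (pvBCore cs).map (fun p => c :: p) := by
  unfold pvBCore
  rw [pvTokB_cons_ne c cs h]
  cases pvTokB cs with
  | none => simp
  | some ts => simp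

lemma pvBCore_group (cs : List Char) (j : Nat)
    (hj : PySem.List.index? ('(' :: cs) ')' = some j)
    (hne : ¬ (('(' :: cs).drop 1).take (j - 1) = []) :
    pvBCore ('(' :: cs) =
      ((('(' :: cs).drop 1).take (j - 1)).flatMap
        (fun ch => (pvBCore (('(' :: cs).drop (j + 1))).map (fun p => ch :: p)) := by
  unfold pvBCore
  rw [pvTokB_group cs j hj hne]
  cases pvTokB (('(' :: cs).drop (j + 1)) with
  | none => simp
  | some ts => simp

lemma pvScan_step1_ne (c : Char) (h : c ≠ ')') : pvScan 1 c = 2 := by simp [pvScan, h]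

lemma pvScan_step2_ne (c : Char) (h : c ≠ ')') : pvScan 2 c = 2 := by simp [pvScan, h]

lemma pvScan2_no_close (l : List Char) (h : ')' ∉ l) : l.foldl pvScan 2 = 2 := by
  induction l with
  | nil => rfl
  | cons c cs ih =>
    simp at h
    rw [List.foldl_cons, pvScan_step2_ne c (fun e => h.1 e.symm), ih h.2]

lemma pvScan2_group (g suf : List Char) (h : ')' ∉ g) :
    (g ++ ')' :: suf).foldl pvScan 2 = suf.foldl pvScan 0 := by
  induction g with
  | nil => rw [List.nil_append, List.foldl_cons]; rfl
  | cons c cs ih =>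
    simp at h
    rw [List.cons_append, List.foldl_cons, pvScan_step2_ne c (fun e => h.1 e.symm), ih h.2]

lemma pvScan1_no_close (l : List Char) (h : ')' ∉ l) :
    l.foldl pvScan 1 = 1 ∨ l.foldl pvScan 1 = 2 := by
  cases l with
  | nil => left; rfl
  | cons c cs =>
    simp at h
    right
    rw [List.foldl_cons, pvScan_step1_ne c (fun e => h.1 e.symm)]
    exact pvScan2_no_close cs h.2

lemma pvScan1_group (g suf : List Char) (h : ')' ∉ g) (hne : g ≠ []) :
    (g ++ ')' :: suf).foldl pvScan 1 = suf.foldl pvScan 0 := by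
  cases g with
  | nil => exact absurd rfl hne
  | cons c cs =>
    simp at h
    rw [List.cons_append, List.foldl_cons, pvScan_step1_ne c (fun e => h.1 e.symm)]
    exact pvScan2_group cs suf h.2

lemma pvCore_eq : ∀ (n : Nat) (l : List Char), l.length ≤ n →
    (l.foldl pvScan 0 = 0 ∨ l.foldl pvScan 0 = 3) → pvACore l = pvBCore l := by
  intro n
  induction n with
  | zero =>
    intro l hl _
    have : l = [] := by cases l <;> simp_all
    subst this
    simp [pvACore, pvBCore, pvTokB]
  | succ n ih =>
    intro l hl hok
    cases l with
    | nil => simp [pvACore, pvBCore, pvTokB]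
    | cons c cs =>
      by_cases hc : c = '('
      · subst hc
        have hok1 : cs.foldl pvScan 1 = 0 ∨ cs.foldl pvScan 1 = 3 := by
          simpa [pvScan] using hok
        cases hj : PySem.List.index? ('(' :: cs) ')' with
        | none =>
          exfalso
          have hnot : ')' ∉ cs := by
            have := (PySem.List.index?_eq_none_iff (xs := '(' :: cs) (v := ')')).mp hj
            simp at this
            exact this
          rcases pvScan1_no_close cs hnot with h' | h' <;> rw [h'] at hok1 <;> omega
        | some j =>
          -- decompose cs at the first ')' via the index? characterisation
          obtain ⟨pre, suf, heq, hlen', hnp⟩ := (PySem.List.index?_eq_some_iff (xs := '(' :: cs) (v := ')') (k := j)).mp hj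
          cases pre with
          | nil => simp at heq
          | cons p g =>
            have hpg : p = '(' ∧ cs = g ++ ')' :: suf := by
              simp [List.cons_append] at heq
              exact ⟨heq.1.symm, heq.2⟩
            obtain ⟨-, hcs⟩ := hpg
            have hng : ')' ∉ g := by simp at hnp; exact hnp.2
            have hglen : g.length = j - 1 := by simp at hlen'; omega
            have hg : (('(' :: cs).drop 1).take (j - 1) = g := by
              subst hcs
              simp [← hglen]
            have hrem : ('(' :: cs).drop (j + 1) = suf := by
              subst hcs
              have : j = g.length + 1 := by simp at hlen'; omega
              simp [this]
            rw [pvACore_group cs j hj, hg, hrem]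
            by_cases hge : g = []
            · -- empty group: both sides are []
              subst hge
              unfold pvBCore
              rw [pvTokB_group_empty cs j hj (by rw [hg])]
              simp
            · -- nonempty group
              have hok' : suf.foldl pvScan 0 = 0 ∨ suf.foldl pvScan 0 = 3 := by
                rw [hcs] at hok1
                rwa [pvScan1_group g suf hng hge] at hok1
              have hlen : suf.length ≤ n := by
                subst hcs
                simp at hl
                omega
              rw [PySem.List.foldl_append_eq_flatMap]
              rw [ih _ hlen hok']
              rw [pvBCore_group cs j hj (by rw [hg]; exact hge), hg, hrem]
              simp
      · rw [pvACore_cons_ne c cs hc, pvBCore_cons_ne c cs hc]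
        have hok' : cs.foldl pvScan 0 = 0 ∨ cs.foldl pvScan 0 = 3 := by
          simpa [pvScan, hc] using hok
        have hlen : cs.length ≤ n := by simp at hl; omega
        rw [ih _ hlen hok']

-- ===== VERDICT (by name: the statement is the Claim_ definition above) =====
theorem parenthetical_possibilities_spec : Claim_equal_parenthetical_possibilities := by
  intro s _ hpre
  unfold Spec_parenthetical_possibilities parenthetical_possibilities parenthetical_possibilities_alt
  rw [pvCore_eq s.toList.length s.toList le_rfl hpre]
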